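-- pv_equiv track=rewrite | github.com/rakshak-2826/SkillSageX | utils/comparator.py | get_skill_gaps
-- ===== SOURCE A (Python) =====
-- from typing import List, Dict
--
-- def get_skill_gaps(resume_skills: List[str], must_have: List[str], optional: List[str]) -> Dict[str, List[str]]:
--     """
--     Returns:
--     - missing must-have skills
--     - missing optional skills
--     - covered must-have skills
--     All values are normalized for case-insensitive, consistent comparison.
--     """
--     resume_set = set(skill.strip().lower() for skill in resume_skills)
--     must_have_set = set(skill.strip().lower() for skill in must_have)
--     optional_set = set(skill.strip().lower() for skill in optional)
--
--     return {
--         "missing_skills": sorted(list(must_have_set - resume_set)),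
--         "optional_missing": sorted(list(optional_set - resume_set)),
--         "covered": sorted(list(resume_set & must_have_set))
--     }
-- ===== SOURCE B (Python) =====
-- def get_skill_gaps(resume_skills, must_have, optional):
--     # Sort-based: normalize, sort, drop adjacent duplicates; decide resume
--     # membership by binary search on the sorted resume array; the single
--     # classification pass then emits all three lists already sorted.
--     def norm_sorted_unique(skills):
--         s = sorted(skill.strip().lower() for skill in skills)
--         res = []
--         for x in s:
--             if not res or res[-1] != x:
--                 res.append(x)
--         return res
--
--     resume = norm_sorted_unique(resume_skills)
--
--     def in_resume(x):
--         lo, hi = 0, len(resume)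
--         while lo < hi:
--             mid = (lo + hi) // 2
--             if resume[mid] < x:
--                 lo = mid + 1
--             else:
--                 hi = mid
--         return lo < len(resume) and resume[lo] == x
--
--     covered, missing = [], []
--     for n in norm_sorted_unique(must_have):
--         (covered if in_resume(n) else missing).append(n)
--     optional_missing = [n for n in norm_sorted_unique(optional) if not in_resume(n)]
--     return {
--         "missing_skills": missing,
--         "optional_missing": optional_missing,
--         "covered": covered,
--     }
-- ===== Notes on version B (the rewrite author's own statement) =====
-- stated objective: alternative
-- what changed: Replaces hash sets and set algebra entirely by a sort-based pipeline: each list is normalized, sorted, and deduplicated by dropping adjacent duplicates; resume membership is decided by a hand-written binary search on the sorted resume array; a single classification pass over the sorted deduped must-have list emits missing and covered already in sorted order, so no set objects and no final sorts exist.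
import Mathlib
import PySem

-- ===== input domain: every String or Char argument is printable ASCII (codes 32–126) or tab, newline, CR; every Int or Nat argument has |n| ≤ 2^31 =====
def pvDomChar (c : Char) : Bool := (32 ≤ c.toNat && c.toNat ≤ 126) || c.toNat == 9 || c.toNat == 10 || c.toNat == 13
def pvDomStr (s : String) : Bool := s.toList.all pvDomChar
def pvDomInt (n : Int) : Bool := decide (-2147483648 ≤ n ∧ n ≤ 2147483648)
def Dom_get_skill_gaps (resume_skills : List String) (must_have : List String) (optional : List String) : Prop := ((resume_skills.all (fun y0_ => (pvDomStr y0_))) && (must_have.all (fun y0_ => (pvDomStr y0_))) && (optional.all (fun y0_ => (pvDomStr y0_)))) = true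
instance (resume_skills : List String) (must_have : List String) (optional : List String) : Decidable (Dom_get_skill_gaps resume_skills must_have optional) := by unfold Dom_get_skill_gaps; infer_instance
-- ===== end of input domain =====

-- B replaces A's hash sets and set algebra by a sort-based pipeline (sort, adjacent-dedup,
-- binary-search membership, one classification pass emitting sorted output); objective: alternative.

-- shared normalization: skill.strip().lower()
def pvNorm (s : String) : String := PySem.Str.lower (PySem.Str.strip s)

-- ===== PORT A =====
def get_skill_gaps (resume_skills : List String) (must_have : List String) (optional : List String) : List (String × List String) :=
  let resume_set : PySem.Set String := PySem.Set.ofList (resume_skills.map pvNorm)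
  let must_have_set : PySem.Set String := PySem.Set.ofList (must_have.map pvNorm)
  let optional_set : PySem.Set String := PySem.Set.ofList (optional.map pvNorm)
  [("missing_skills", PySem.List.sorted (PySem.Set.diff must_have_set resume_set) (fun x => x) false),
   ("optional_missing", PySem.List.sorted (PySem.Set.diff optional_set resume_set) (fun x => x) false),
   ("covered", PySem.List.sorted (PySem.Set.inter resume_set must_have_set) (fun x => x) false)]

-- ===== PORT B =====
-- body of B's adjacent-dedup loop: append x unless it equals the last element kept
def pvDedupStep (acc : List String) (x : String) : List String :=
  if acc.getLast? = some x then acc else acc ++ [x]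

-- B's norm_sorted_unique: normalize, sort, drop adjacent duplicates
def pvSortedUnique (skills : List String) : List String :=
  (PySem.List.sorted (skills.map pvNorm) (fun s => s) false).foldl pvDedupStep []

-- B's while-loop binary search (lo/hi invariant loop); the fuel argument only bounds the
-- iteration count (hi - lo halves each step, so an initial fuel of r.length suffices);
-- r.getD mid "" is resume[mid], always in range since lo < hi ≤ r.length at every probe
def pvBsGo (r : List String) (x : String) : Nat → Nat → Nat → Nat
  | 0, lo, _ => lo
  | fuel + 1, lo, hi =>
    if lo < hi then
      let mid := (lo + hi) / 2
      if r.getD mid "" < x then pvBsGo r x fuel (mid + 1) hi else pvBsGo r x fuel lo mid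
    else lo

-- B's in_resume
def pvInResume (r : List String) (x : String) : Bool :=
  let lo := pvBsGo r x r.length 0 r.length
  decide (lo < r.length) && (r.getD lo "" == x)

def get_skill_gaps_alt (resume_skills : List String) (must_have : List String) (optional : List String) : List (String × List String) :=
  let resume := pvSortedUnique resume_skills
  let cm := (pvSortedUnique must_have).foldl
    (fun acc n => if pvInResume resume n then (acc.1 ++ [n], acc.2) else (acc.1, acc.2 ++ [n])) ([], [])
  let optional_missing := (pvSortedUnique optional).filter (fun n => !pvInResume resume n)
  [("missing_skills", cm.2), ("optional_missing", optional_missing), ("covered", cm.1)]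

-- ===== PRECONDITION & SPEC =====
def Spec_get_skill_gaps (resume_skills : List String) (must_have : List String) (optional : List String) (out : List (String × List String)) : Prop := out = get_skill_gaps_alt resume_skills must_have optional
instance (resume_skills : List String) (must_have : List String) (optional : List String) (out : List (String × List String)) : Decidable (Spec_get_skill_gaps resume_skills must_have optional out) := by unfold Spec_get_skill_gaps; infer_instance

-- ===== CLAIM (what is proved, stated in full; the proofs are below) =====
def Claim_equal_get_skill_gaps : Prop := ∀ (resume_skills : List String) (must_have : List String) (optional : List String), Dom_get_skill_gaps resume_skills must_have optional → Spec_get_skill_gaps resume_skills must_have optional (get_skill_gaps resume_skills must_have optional)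

-- ===== LEMMAS AND PROOFS =====

-- recursion computed by the dedup fold once an element p has been kept last
def pvDedupFrom (p : String) : List String → List String
  | [] => []
  | x :: t => if x = p then pvDedupFrom p t else x :: pvDedupFrom x t

theorem pvDedupStep_fold (xs : List String) : ∀ (acc : List String) (p : String),
    acc.getLast? = some p → xs.foldl pvDedupStep acc = acc ++ pvDedupFrom p xs := by
  induction xs with
  | nil => intro acc p _; simp [pvDedupFrom]
  | cons x t ih =>
      intro acc p hl
      by_cases hx : x = p
      · subst hx
        simp [List.foldl_cons, pvDedupStep, hl, pvDedupFrom, ih acc x hl]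
      · have hne : acc.getLast? ≠ some x := by
          rw [hl]; exact fun h => hx (Option.some.inj h).symm
        have hlast : (acc ++ [x]).getLast? = some x := by simp
        simp [List.foldl_cons, pvDedupStep, hne, pvDedupFrom, hx, ih (acc ++ [x]) x hlast]

theorem pvDedupFrom_spec (t : List String) : ∀ p : String, t.Pairwise (· ≤ ·) → (∀ y ∈ t, p ≤ y) →
    (pvDedupFrom p t).Pairwise (· < ·) ∧ (∀ y, y ∈ pvDedupFrom p t ↔ (y ∈ t ∧ y ≠ p)) := by
  induction t with
  | nil => intro p _ _; simp [pvDedupFrom]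
  | cons x t ih =>
      intro p hs hp
      have hx1 : ∀ y ∈ t, x ≤ y := (List.pairwise_cons.1 hs).1
      have hs' : t.Pairwise (· ≤ ·) := (List.pairwise_cons.1 hs).2
      by_cases hx : x = p
      · subst hx
        obtain ⟨h1, h2⟩ := ih x hs' hx1
        have hred : pvDedupFrom x (x :: t) = pvDedupFrom x t := by
          simp [pvDedupFrom]
        rw [hred]
        refine ⟨h1, fun y => ?_⟩
        rw [h2 y]
        constructor
        · rintro ⟨hy, hne⟩; exact ⟨List.mem_cons_of_mem _ hy, hne⟩
        · rintro ⟨hy, hne⟩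
          rcases List.mem_cons.1 hy with rfl | hy'
          · exact absurd rfl hne
          · exact ⟨hy', hne⟩
      · have hpx : p < x := lt_of_le_of_ne (hp x (by simp)) (fun h => hx h.symm)
        obtain ⟨h1, h2⟩ := ih x hs' hx1
        constructor
        · simp only [pvDedupFrom, if_neg hx]
          refine List.pairwise_cons.2 ⟨fun y hy => ?_, h1⟩
          obtain ⟨hyt, hyx⟩ := (h2 y).1 hy
          exact lt_of_le_of_ne (hx1 y hyt) (fun h => hyx h.symm)
        · intro y
          simp only [pvDedupFrom, if_neg hx, List.mem_cons, h2]
          constructor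
          · rintro (rfl | ⟨hy, hne⟩)
            · exact ⟨Or.inl rfl, fun h => hx h⟩
            · refine ⟨Or.inr hy, fun h => ?_⟩
              have := hx1 y hy
              rw [h] at this
              exact absurd this (not_le.2 hpx)
          · rintro ⟨rfl | hy, hne⟩
            · exact Or.inl rfl
            · by_cases hyx : y = x
              · exact Or.inl hyx
              · exact Or.inr ⟨hy, hyx⟩

-- pvSortedUnique xs is the strictly increasing enumeration of the normalized skills of xs
theorem pvSortedUnique_spec (xs : List String) :
    (pvSortedUnique xs).Pairwise (· < ·) ∧ (∀ y, y ∈ pvSortedUnique xs ↔ y ∈ xs.map pvNorm) := by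
  unfold pvSortedUnique
  rcases hS : PySem.List.sorted (xs.map pvNorm) (fun s => s) false with _ | ⟨m, t⟩
  · constructor
    · simp
    · intro y
      have : xs.map pvNorm = [] :=
        (PySem.List.sorted_eq_nil_iff (xs := xs.map pvNorm) (key := fun s => s)
          (rev := false)).1 hS
      simp [this]
  · have hmem : ∀ y, y ∈ m :: t ↔ y ∈ xs.map pvNorm := by
      intro y
      rw [← hS]
      exact PySem.List.mem_sorted _ _ _ _
    have hpw : (m :: t).Pairwise (fun a b => a ≤ b) := by
      have := PySem.List.sorted_pairwise (xs := xs.map pvNorm) (key := fun s => s)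
      rw [hS] at this
      exact this
    have hmt : ∀ y ∈ t, m ≤ y := (List.pairwise_cons.1 hpw).1
    have ht : t.Pairwise (· ≤ ·) := (List.pairwise_cons.1 hpw).2
    obtain ⟨h1, h2⟩ := pvDedupFrom_spec t m ht hmt
    have hfold : t.foldl pvDedupStep [m] = [m] ++ pvDedupFrom m t :=
      pvDedupStep_fold t [m] m (by simp)
    have hstep : List.foldl pvDedupStep [] (m :: t) = m :: pvDedupFrom m t := by
      simp [List.foldl_cons, pvDedupStep, hfold]
    rw [hstep]
    constructor
    · refine List.pairwise_cons.2 ⟨fun y hy => ?_, h1⟩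
      obtain ⟨hyt, hym⟩ := (h2 y).1 hy
      exact lt_of_le_of_ne (hmt y hyt) (fun h => hym h.symm)
    · intro y
      rw [← hmem y]
      simp only [List.mem_cons, h2]
      constructor
      · rintro (rfl | ⟨hy, _⟩)
        · exact Or.inl rfl
        · exact Or.inr hy
      · rintro (rfl | hy)
        · exact Or.inl rfl
        · by_cases hym : y = m
          · exact Or.inl hym
          · exact Or.inr ⟨hy, hym⟩

theorem pvPairwise_lt_nodup {l : List String} (h : l.Pairwise (· < ·)) : l.Nodup :=
  h.imp (fun hab => ne_of_lt hab)

-- monotone indexed access on a ≤-sorted list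
theorem pvGetD_mono {r : List String} (hr : r.Pairwise (· ≤ ·)) {i j : Nat}
    (hij : i ≤ j) (hj : j < r.length) : r.getD i "" ≤ r.getD j "" := by
  rcases Nat.eq_or_lt_of_le hij with rfl | hlt
  · exact le_refl _
  · have hi : i < r.length := lt_trans hlt hj
    rw [List.getD_eq_getElem r "" hi, List.getD_eq_getElem r "" hj]
    exact List.pairwise_iff_getElem.1 hr i j hi hj hlt

theorem pvBsGo_spec (r : List String) (x : String) (hr : r.Pairwise (· ≤ ·)) :
    ∀ (n lo hi : Nat), hi - lo ≤ n → lo ≤ hi → hi ≤ r.length →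
      (∀ i, i < lo → r.getD i "" < x) → (∀ i, hi ≤ i → i < r.length → x ≤ r.getD i "") →
      lo ≤ pvBsGo r x n lo hi ∧ pvBsGo r x n lo hi ≤ hi ∧
      (∀ i, i < pvBsGo r x n lo hi → r.getD i "" < x) ∧
      (∀ i, pvBsGo r x n lo hi ≤ i → i < r.length → x ≤ r.getD i "") := by
  intro n
  induction n with
  | zero =>
      intro lo hi hfuel hlh hhr hlo hhi
      have : lo = hi := by omega
      subst this
      exact ⟨le_refl _, le_refl _, hlo, hhi⟩
  | succ n ih =>
      intro lo hi hfuel hlh hhr hlo hhi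
      by_cases h : lo < hi
      · rw [pvBsGo]
        simp only [h, if_true]
        have hmidlo : lo ≤ (lo + hi) / 2 := by omega
        have hmidhi : (lo + hi) / 2 < hi := by omega
        by_cases hc : r.getD ((lo + hi) / 2) "" < x
        · simp only [hc, if_pos]
          refine (ih ((lo + hi) / 2 + 1) hi (by omega) (by omega) hhr ?_ hhi).imp
            (fun h1 => by omega) (fun h2 => h2)
          intro i hi'
          have hi2 : i ≤ (lo + hi) / 2 := by omega
          exact lt_of_le_of_lt (pvGetD_mono hr hi2 (by omega)) hc
        · simp only [hc, if_false]
          have hx : x ≤ r.getD ((lo + hi) / 2) "" := le_of_not_gt hc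
          refine (ih lo ((lo + hi) / 2) (by omega) (by omega) (by omega) hlo ?_).imp
            (fun h1 => h1) (fun ⟨h2, h3, h4⟩ => ⟨by omega, h3, h4⟩)
          intro i hi1 hi2
          exact le_trans hx (pvGetD_mono hr hi1 hi2)
      · rw [pvBsGo]
        simp only [h, if_false]
        have : lo = hi := by omega
        subst this
        exact ⟨le_refl _, le_refl _, hlo, hhi⟩

-- binary search on a ≤-sorted list is membership
theorem pvInResume_eq_mem (r : List String) (x : String) (hr : r.Pairwise (· ≤ ·)) :
    pvInResume r x = decide (x ∈ r) := by
  obtain ⟨h1, h2, h3, h4⟩ := pvBsGo_spec r x hr r.length 0 r.length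
    (by omega) (by omega) (le_refl _) (by omega) (fun i hi1 hi2 => by omega)
  set l := pvBsGo r x r.length 0 r.length with hl
  unfold pvInResume
  rw [← hl]
  by_cases hm : x ∈ r
  · obtain ⟨j, hj, hjx⟩ := List.mem_iff_getElem.1 hm
    have hjl : l ≤ j := by
      by_contra hlt
      have := h3 j (by omega)
      rw [List.getD_eq_getElem r "" hj, hjx] at this
      exact lt_irrefl x this
    have hllen : l < r.length := lt_of_le_of_lt hjl hj
    have hxl : x ≤ r.getD l "" := h4 l (le_refl _) hllen
    have hlx : r.getD l "" ≤ x := by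
      have := pvGetD_mono hr hjl hj
      rwa [List.getD_eq_getElem r "" hj, hjx] at this
    have hgx : r[l] = x := by
      rw [← List.getD_eq_getElem r "" hllen]; exact le_antisymm hlx hxl
    simp [hm, hllen, hgx]
  · simp only [hm, decide_false]
    by_cases hllen : l < r.length
    · have hgx : ¬ r[l] = x := fun h => hm (h ▸ List.getElem_mem hllen)
      simp [hllen, hgx]
    · simp [hllen]

-- the classification fold is a pair of filters
theorem pvFoldClassify (f : String → Bool) (l : List String) : ∀ (c m : List String),
    l.foldl (fun acc n => if f n then (acc.1 ++ [n], acc.2) else (acc.1, acc.2 ++ [n])) (c, m)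
      = (c ++ l.filter f, m ++ l.filter (fun n => !f n)) := by
  induction l with
  | nil => intro c m; simp
  | cons x t ih =>
      intro c m
      by_cases hx : f x
      · simp [List.foldl_cons, hx, ih]
      · simp [List.foldl_cons, hx, ih]

-- a strictly increasing list with the members of zs is sorted(set-like zs)
theorem pvSortedEq (zs ys : List String) (hys : ys.Pairwise (· < ·))
    (hmem : ∀ y, y ∈ ys ↔ y ∈ zs) (hnz : zs.Nodup) :
    PySem.List.sorted zs (fun x => x) false = ys :=
  PySem.List.sorted_eq_of_perm_of_pairwise_lt zs ys (fun x => x)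
    ((List.perm_ext_iff_of_nodup (pvPairwise_lt_nodup hys) hnz).2 hmem) hys

-- ===== VERDICT (by name: the statement is the Claim_ definition above) =====
theorem get_skill_gaps_spec : Claim_equal_get_skill_gaps := by
  intro rs mh op _
  unfold Spec_get_skill_gaps
  simp only [get_skill_gaps, get_skill_gaps_alt]
  obtain ⟨hRlt, hRmem⟩ := pvSortedUnique_spec rs
  obtain ⟨hMlt, hMmem⟩ := pvSortedUnique_spec mh
  obtain ⟨hOlt, hOmem⟩ := pvSortedUnique_spec op
  have hRle : (pvSortedUnique rs).Pairwise (· ≤ ·) := hRlt.imp le_of_lt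
  have hIn : ∀ y, pvInResume (pvSortedUnique rs) y
      = decide (y ∈ rs.map pvNorm) := by
    intro y
    rw [pvInResume_eq_mem _ y hRle, decide_eq_decide]
    exact hRmem y
  rw [pvFoldClassify]
  simp only [List.nil_append]
  have hmiss : PySem.List.sorted
      (PySem.Set.diff (PySem.Set.ofList (mh.map pvNorm)) (PySem.Set.ofList (rs.map pvNorm)))
      (fun x => x) false
      = (pvSortedUnique mh).filter (fun n => !pvInResume (pvSortedUnique rs) n) := by
    have hpw : ((pvSortedUnique mh).filter (fun n => !pvInResume (pvSortedUnique rs) n)).Pairwise (· < ·) :=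
      hMlt.filter _
    have hnd : (PySem.Set.diff (PySem.Set.ofList (mh.map pvNorm)) (PySem.Set.ofList (rs.map pvNorm))).Nodup :=
      PySem.Set.nodup_diff _ _ (PySem.Set.nodup_ofList _)
    have hmm : ∀ y, y ∈ (pvSortedUnique mh).filter (fun n => !pvInResume (pvSortedUnique rs) n) ↔
        y ∈ PySem.Set.diff (PySem.Set.ofList (mh.map pvNorm)) (PySem.Set.ofList (rs.map pvNorm)) := by
      intro y
      rw [List.mem_filter, hMmem y, PySem.Set.mem_diff, hIn y]
      simp [PySem.Set.mem_ofList]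
    exact pvSortedEq _ _ hpw hmm hnd
  have hopt : PySem.List.sorted
      (PySem.Set.diff (PySem.Set.ofList (op.map pvNorm)) (PySem.Set.ofList (rs.map pvNorm)))
      (fun x => x) false
      = (pvSortedUnique op).filter (fun n => !pvInResume (pvSortedUnique rs) n) := by
    have hpw : ((pvSortedUnique op).filter (fun n => !pvInResume (pvSortedUnique rs) n)).Pairwise (· < ·) :=
      hOlt.filter _
    have hnd : (PySem.Set.diff (PySem.Set.ofList (op.map pvNorm)) (PySem.Set.ofList (rs.map pvNorm))).Nodup :=
      PySem.Set.nodup_diff _ _ (PySem.Set.nodup_ofList _)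
    have hmm : ∀ y, y ∈ (pvSortedUnique op).filter (fun n => !pvInResume (pvSortedUnique rs) n) ↔
        y ∈ PySem.Set.diff (PySem.Set.ofList (op.map pvNorm)) (PySem.Set.ofList (rs.map pvNorm)) := by
      intro y
      rw [List.mem_filter, hOmem y, PySem.Set.mem_diff, hIn y]
      simp [PySem.Set.mem_ofList]
    exact pvSortedEq _ _ hpw hmm hnd
  have hcov : PySem.List.sorted
      (PySem.Set.inter (PySem.Set.ofList (rs.map pvNorm)) (PySem.Set.ofList (mh.map pvNorm)))
      (fun x => x) false
      = (pvSortedUnique mh).filter (fun n => pvInResume (pvSortedUnique rs) n) := by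
    have hpw : ((pvSortedUnique mh).filter (fun n => pvInResume (pvSortedUnique rs) n)).Pairwise (· < ·) :=
      hMlt.filter _
    have hnd : (PySem.Set.inter (PySem.Set.ofList (rs.map pvNorm)) (PySem.Set.ofList (mh.map pvNorm))).Nodup :=
      PySem.Set.nodup_inter _ _ (PySem.Set.nodup_ofList _)
    have hmm : ∀ y, y ∈ (pvSortedUnique mh).filter (fun n => pvInResume (pvSortedUnique rs) n) ↔
        y ∈ PySem.Set.inter (PySem.Set.ofList (rs.map pvNorm)) (PySem.Set.ofList (mh.map pvNorm)) := by
      intro y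
      rw [List.mem_filter, hMmem y, PySem.Set.mem_inter, hIn y]
      simp [PySem.Set.mem_ofList, and_comm]
    exact pvSortedEq _ _ hpw hmm hnd
  rw [hmiss, hopt, hcov]
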